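-- pv_equiv track=rewrite | github.com/iCalculate/klayout-nanodevice-toolkit | utils/geometry.py | _peano_point
-- ===== SOURCE A (Python) =====
-- def _peano_point(t, order):
--     """Get point on Peano curve at parameter t"""
--     x, y = 0, 0
--     s = 1
--
--     for i in range(order):
--         # Peano curve divides space into 3x3 grid
--         tx = t % 3
--         ty = (t // 3) % 3
--
--         # Apply Peano transformation
--         if tx == 0:
--             if ty == 0:
--                 x, y = x, y
--             elif ty == 1:
--                 x, y = s - x, y
--             else:  # ty == 2
--                 x, y = x, y
--         elif tx == 1:
--             if ty == 0:
--                 x, y = x, s - y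
--             elif ty == 1:
--                 x, y = s - x, s - y
--             else:  # ty == 2
--                 x, y = x, s - y
--         else:  # tx == 2
--             if ty == 0:
--                 x, y = x, y
--             elif ty == 1:
--                 x, y = s - x, y
--             else:  # ty == 2
--                 x, y = x, y
--
--         t //= 9
--         s *= 3
--
--     return x, y
-- ===== SOURCE B (Python) =====
-- def _peano_point(t, order):
--     """Point on Peano curve at parameter t: each coordinate is an alternating
--     sum of the scales 3**i whose base-9 digit half equals 1 (highest scale
--     positive), accumulated bottom-up and sign-corrected at the end."""
--     n = order if order > 0 else 0
--     ax = ay = 0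
--     sx = sy = 1
--     u, p = t, 1
--     for _ in range(n):
--         if (u // 3) % 3 == 1:
--             ax += sx * p
--             sx = -sx
--         if u % 3 == 1:
--             ay += sy * p
--             sy = -sy
--         u //= 9
--         p *= 3
--     return (-sx * ax, -sy * ay)
-- ===== Notes on version B (the rewrite author's own statement) =====
-- stated objective: simpler
-- what changed: Replaces the coupled 9-way branch of repeated reflections (x,y)->(s-x,s-y) with two independent signed accumulators: each coordinate is an alternating sum of the scales 3^i whose digit equals 1, accumulated in one pass with a flipping sign and corrected by one final sign.
import Mathlib
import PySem

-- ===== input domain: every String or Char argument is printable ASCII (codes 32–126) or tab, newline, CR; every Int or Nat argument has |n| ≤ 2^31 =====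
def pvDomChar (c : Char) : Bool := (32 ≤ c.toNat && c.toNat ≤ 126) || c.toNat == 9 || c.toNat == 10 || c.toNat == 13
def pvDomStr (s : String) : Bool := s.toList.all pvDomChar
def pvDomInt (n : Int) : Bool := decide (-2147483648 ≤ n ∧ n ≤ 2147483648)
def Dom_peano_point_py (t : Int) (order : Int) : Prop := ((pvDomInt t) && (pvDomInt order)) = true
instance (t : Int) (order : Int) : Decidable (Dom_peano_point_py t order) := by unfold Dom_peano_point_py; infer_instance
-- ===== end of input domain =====

-- B replaces A's coupled 9-way reflection loop with two independent signed
-- alternating-sum accumulators, one per coordinate (objective: simpler).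

-- ===== PORT A =====
-- the for-loop of A: state (x, y, s, t), n = remaining iterations of range(order)
def peanoLoopA : Nat → Int → Int → Int → Int → Int × Int
  | 0, x, y, _, _ => (x, y)
  | n + 1, x, y, s, t =>
      let tx := PySem.Int.mod t 3
      let ty := PySem.Int.mod (PySem.Int.floordiv t 3) 3
      let xy :=
        if tx == 0 then
          if ty == 0 then (x, y)
          else if ty == 1 then (s - x, y)
          else (x, y)
        else if tx == 1 then
          if ty == 0 then (x, s - y)
          else if ty == 1 then (s - x, s - y)
          else (x, s - y)
        else
          if ty == 0 then (x, y)
          else if ty == 1 then (s - x, y)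
          else (x, y)
      peanoLoopA n xy.1 xy.2 (s * 3) (PySem.Int.floordiv t 9)

def peano_point_py (t : Int) (order : Int) : Int × Int :=
  peanoLoopA order.toNat 0 0 1 t

-- ===== PORT B =====
-- Source B's single loop: state (ax, ay, sx, sy, p, u), one level per step, bottom-up
def peanoLoopB : Nat → Int → Int → Int → Int → Int → Int → Int × Int × Int × Int
  | 0, ax, ay, sx, sy, _, _ => (ax, ay, sx, sy)
  | n + 1, ax, ay, sx, sy, p, u =>
      let hitX := PySem.Int.mod (PySem.Int.floordiv u 3) 3 == 1
      let hitY := PySem.Int.mod u 3 == 1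
      peanoLoopB n (if hitX then ax + sx * p else ax) (if hitY then ay + sy * p else ay)
        (if hitX then -sx else sx) (if hitY then -sy else sy)
        (p * 3) (PySem.Int.floordiv u 9)

def peano_point_py_alt (t : Int) (order : Int) : Int × Int :=
  let st := peanoLoopB order.toNat 0 0 1 1 1 t
  (-st.2.2.1 * st.1, -st.2.2.2 * st.2.1)

-- ===== PRECONDITION & SPEC =====
def Spec_peano_point_py (t : Int) (order : Int) (out : Int × Int) : Prop := out = peano_point_py_alt t order
instance (t : Int) (order : Int) (out : Int × Int) : Decidable (Spec_peano_point_py t order out) := by unfold Spec_peano_point_py; infer_instance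

-- ===== CLAIM (what is proved, stated in full; the proofs are below) =====
def Claim_equal_peano_point_py : Prop := ∀ (t : Int) (order : Int), Dom_peano_point_py t order → Spec_peano_point_py t order (peano_point_py t order)

-- ===== LEMMAS AND PROOFS =====

-- A's loop, restricted to one coordinate: x is flipped iff the ty digit is 1 …
def gA : Nat → Int → Int → Int → Int
  | 0, x, _, _ => x
  | n + 1, x, s, t =>
      gA n (if PySem.Int.mod (PySem.Int.floordiv t 3) 3 == 1 then s - x else x) (s * 3) (PySem.Int.floordiv t 9)

-- … and y is flipped iff the tx digit is 1
def gB : Nat → Int → Int → Int → Int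
  | 0, y, _, _ => y
  | n + 1, y, s, t =>
      gB n (if PySem.Int.mod t 3 == 1 then s - y else y) (s * 3) (PySem.Int.floordiv t 9)

theorem peanoLoopA_eq (n : Nat) : ∀ (x y s t : Int),
    peanoLoopA n x y s t = (gA n x s t, gB n y s t) := by
  induction n with
  | zero => intro x y s t; rfl
  | succ n ih =>
    intro x y s t
    have htx0 : 0 ≤ PySem.Int.mod t 3 := PySem.Int.mod_nonneg t (by norm_num)
    have htx3 : PySem.Int.mod t 3 < 3 := PySem.Int.mod_lt t (by norm_num)
    have hty0 : 0 ≤ PySem.Int.mod (PySem.Int.floordiv t 3) 3 :=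
      PySem.Int.mod_nonneg _ (by norm_num)
    have hty3 : PySem.Int.mod (PySem.Int.floordiv t 3) 3 < 3 :=
      PySem.Int.mod_lt _ (by norm_num)
    simp only [peanoLoopA, gA, gB, ih]
    rcases (by omega : PySem.Int.mod t 3 = 0 ∨ PySem.Int.mod t 3 = 1 ∨ PySem.Int.mod t 3 = 2) with h | h | h <;>
      rcases (by omega : PySem.Int.mod (PySem.Int.floordiv t 3) 3 = 0 ∨
          PySem.Int.mod (PySem.Int.floordiv t 3) 3 = 1 ∨
          PySem.Int.mod (PySem.Int.floordiv t 3) 3 = 2) with h' | h' | h' <;>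
      simp only [h, h'] <;> norm_num

-- sign accumulated by gA's flips (−1 per level whose ty digit is 1) …
def epsA : Nat → Int → Int
  | 0, _ => 1
  | n + 1, t =>
      (if PySem.Int.mod (PySem.Int.floordiv t 3) 3 == 1 then -1 else 1) *
        epsA n (PySem.Int.floordiv t 9)

-- … and by gB's flips (−1 per level whose tx digit is 1)
def epsB : Nat → Int → Int
  | 0, _ => 1
  | n + 1, t =>
      (if PySem.Int.mod t 3 == 1 then -1 else 1) * epsB n (PySem.Int.floordiv t 9)

-- gA / gB are affine in their start value, with slope epsA / epsB
theorem gA_affine (n : Nat) : ∀ (x s t : Int), gA n x s t = gA n 0 s t + epsA n t * x := by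
  induction n with
  | zero => intro x s t; simp [gA, epsA]
  | succ n ih =>
    intro x s t
    show gA n _ (s * 3) (PySem.Int.floordiv t 9) = gA n _ (s * 3) (PySem.Int.floordiv t 9) + _
    rw [ih (if PySem.Int.mod (PySem.Int.floordiv t 3) 3 == 1 then s - x else x),
      ih (if PySem.Int.mod (PySem.Int.floordiv t 3) 3 == 1 then s - 0 else 0), epsA]
    split_ifs <;> ring

theorem gB_affine (n : Nat) : ∀ (y s t : Int), gB n y s t = gB n 0 s t + epsB n t * y := by
  induction n with
  | zero => intro y s t; simp [gB, epsB]
  | succ n ih =>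
    intro y s t
    show gB n _ (s * 3) (PySem.Int.floordiv t 9) = gB n _ (s * 3) (PySem.Int.floordiv t 9) + _
    rw [ih (if PySem.Int.mod t 3 == 1 then s - y else y),
      ih (if PySem.Int.mod t 3 == 1 then s - 0 else 0), epsB]
    split_ifs <;> ring

-- the flip signs square to 1
theorem epsA_sq (n : Nat) : ∀ (t : Int), epsA n t * epsA n t = 1 := by
  induction n with
  | zero => intro t; simp [epsA]
  | succ n ih =>
    intro t
    rw [epsA]
    split_ifs <;> simpa using ih (PySem.Int.floordiv t 9)

theorem epsB_sq (n : Nat) : ∀ (t : Int), epsB n t * epsB n t = 1 := by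
  induction n with
  | zero => intro t; simp [epsB]
  | succ n ih =>
    intro t
    rw [epsB]
    split_ifs <;> simpa using ih (PySem.Int.floordiv t 9)

-- B's signed bottom-up accumulation in closed form: ax ends at ax − sx·ε·gA (same for y)
theorem peanoLoopB_eq (n : Nat) : ∀ (ax ay sx sy p u : Int),
    peanoLoopB n ax ay sx sy p u =
      (ax - sx * epsA n u * gA n 0 p u, ay - sy * epsB n u * gB n 0 p u,
        sx * epsA n u, sy * epsB n u) := by
  induction n with
  | zero => intro ax ay sx sy p u; simp [peanoLoopB, gA, gB, epsA, epsB]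
  | succ n ih =>
    intro ax ay sx sy p u
    rw [peanoLoopB]
    show peanoLoopB n _ _ _ _ (p * 3) (PySem.Int.floordiv u 9) = _
    rw [ih]
    have hA : gA (n + 1) 0 p u =
        gA n 0 (p * 3) (PySem.Int.floordiv u 9) + epsA n (PySem.Int.floordiv u 9) *
          (if PySem.Int.mod (PySem.Int.floordiv u 3) 3 == 1 then p - 0 else 0) := by
      rw [gA, gA_affine]
    have hB : gB (n + 1) 0 p u =
        gB n 0 (p * 3) (PySem.Int.floordiv u 9) + epsB n (PySem.Int.floordiv u 9) *
          (if PySem.Int.mod u 3 == 1 then p - 0 else 0) := by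
      rw [gB, gB_affine]
    have hEA := epsA_sq n (PySem.Int.floordiv u 9)
    have hEB := epsB_sq n (PySem.Int.floordiv u 9)
    rw [hA, hB]
    show (_, _, _, _) = _
    simp only [epsA, epsB, Prod.mk.injEq]
    refine ⟨?_, ?_, ?_, ?_⟩
    · split_ifs
      · linear_combination (-(sx * p)) * hEA
      · ring
    · split_ifs
      · linear_combination (-(sy * p)) * hEB
      · ring
    · split_ifs <;> ring
    · split_ifs <;> ring

-- ===== VERDICT (by name: the statement is the Claim_ definition above) =====
theorem peano_point_py_spec : Claim_equal_peano_point_py := by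
  intro t order _
  show peano_point_py t order = peano_point_py_alt t order
  rw [peano_point_py, peano_point_py_alt, peanoLoopA_eq, peanoLoopB_eq]
  have hEA := epsA_sq order.toNat t
  have hEB := epsB_sq order.toNat t
  show (_, _) = (_, _)
  simp only [Prod.mk.injEq]
  constructor
  · linear_combination (-(gA order.toNat 0 1 t)) * hEA
  · linear_combination (-(gB order.toNat 0 1 t)) * hEB
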